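-- pv_equiv track=rewrite | github.com/gerakolt/direxeno_privet | WFsim (copy)/try.py | fuck
-- ===== SOURCE A (Python) =====
-- def fuck(N):
--     a=10
--     b=10
--     while N>0:
--         N-=1
--         a+=1
--         b-=2
--         yield [a, b]
-- ===== SOURCE B (Python) =====
-- def fuck(N):
--     i = 0
--     while i < N:
--         yield [11 + i, 8 - 2 * i]
--         i += 1
-- ===== Notes on version B (the rewrite author's own statement) =====
-- stated objective: simpler
-- what changed: Replaces the two mutating running counters a and b with a single loop index i, computing each yielded pair directly in closed form as [11+i, 8-2*i].
import Mathlib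
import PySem

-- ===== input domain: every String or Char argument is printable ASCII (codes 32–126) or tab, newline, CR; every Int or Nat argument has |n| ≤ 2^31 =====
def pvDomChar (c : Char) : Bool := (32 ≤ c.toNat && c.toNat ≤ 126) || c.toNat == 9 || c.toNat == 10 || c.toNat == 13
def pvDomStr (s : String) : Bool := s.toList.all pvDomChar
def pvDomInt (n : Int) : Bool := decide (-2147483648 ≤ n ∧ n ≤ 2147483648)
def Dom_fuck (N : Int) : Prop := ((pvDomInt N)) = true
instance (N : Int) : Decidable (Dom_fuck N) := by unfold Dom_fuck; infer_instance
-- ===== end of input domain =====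

-- B replaces A's two mutating running counters with a single loop index and a closed-form pair; objective: simpler.

-- ===== PORT A =====
-- while N>0: N-=1; a+=1; b-=2; yield [a,b]
def fuckLoopA (N a b : Int) : List (List Int) :=
  if N > 0 then [a + 1, b - 2] :: fuckLoopA (N - 1) (a + 1) (b - 2) else []
termination_by N.toNat
decreasing_by omega

def fuck (N : Int) : List (List Int) := fuckLoopA N 10 10

-- ===== PORT B =====
-- i=0; while i<N: yield [11+i, 8-2*i]; i+=1
def fuckLoopB (i N : Int) : List (List Int) :=
  if i < N then [11 + i, 8 - 2 * i] :: fuckLoopB (i + 1) N else []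
termination_by (N - i).toNat
decreasing_by omega

def fuck_alt (N : Int) : List (List Int) := fuckLoopB 0 N

-- ===== PRECONDITION & SPEC =====
def Spec_fuck (N : Int) (out : List (List Int)) : Prop := out = fuck_alt N
instance (N : Int) (out : List (List Int)) : Decidable (Spec_fuck N out) := by unfold Spec_fuck; infer_instance

-- ===== CLAIM (what is proved, stated in full; the proofs are below) =====
def Claim_equal_fuck : Prop := ∀ (N : Int), Dom_fuck N → Spec_fuck N (fuck N)

-- ===== LEMMAS AND PROOFS =====
theorem fuckLoop_key (n : Nat) : ∀ (N i : Int), N.toNat = n →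
    fuckLoopA N (10 + i) (10 - 2 * i) = fuckLoopB i (i + N) := by
  induction n with
  | zero =>
    intro N i h
    rw [fuckLoopA, fuckLoopB]
    have hN : ¬ N > 0 := by omega
    rw [if_neg hN, if_neg (by omega)]
  | succ k ih =>
    intro N i h
    rw [fuckLoopA, fuckLoopB]
    have hN : N > 0 := by omega
    rw [if_pos hN, if_pos (by omega)]
    have h1 : (10 : Int) + i + 1 = 10 + (i + 1) := by ring
    have h2 : (10 : Int) - 2 * i - 2 = 10 - 2 * (i + 1) := by ring
    have h3 : i + N = (i + 1) + (N - 1) := by ring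
    rw [h1, h2, h3, ih (N - 1) (i + 1) (by omega)]
    rw [show (10:Int) + (i + 1) = 11 + i by ring, show (10:Int) - 2 * (i + 1) = 8 - 2 * i by ring]

-- ===== VERDICT (by name: the statement is the Claim_ definition above) =====
theorem fuck_spec : Claim_equal_fuck := by
  intro N _
  unfold Spec_fuck fuck fuck_alt
  have := fuckLoop_key N.toNat N 0 rfl
  simpa using this
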